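-- pv_equiv track=rewrite | github.com/FilMarini/bigbanger | firmware/utils.py | byte_length
-- ===== SOURCE A (Python) =====
-- def byte_length(n):
--     if n == 0:
--         return 1  # Even 0 requires at least 1 byte
--     bytes_count = 0
--     while n:
--         n >>= 8  # Shift 8 bits (1 byte) at a time
--         bytes_count += 1
--     return bytes_count
-- ===== SOURCE B (Python) =====
-- def byte_length(n):
--     if n == 0:
--         return 1
--     return (n.bit_length() + 7) // 8
-- ===== Notes on version B (the rewrite author's own statement) =====
-- stated objective: simpler
-- what changed: B replaces the shift-count loop with the closed-form ceiling division (n.bit_length() + 7) // 8; no loop or accumulator.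
import Mathlib
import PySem

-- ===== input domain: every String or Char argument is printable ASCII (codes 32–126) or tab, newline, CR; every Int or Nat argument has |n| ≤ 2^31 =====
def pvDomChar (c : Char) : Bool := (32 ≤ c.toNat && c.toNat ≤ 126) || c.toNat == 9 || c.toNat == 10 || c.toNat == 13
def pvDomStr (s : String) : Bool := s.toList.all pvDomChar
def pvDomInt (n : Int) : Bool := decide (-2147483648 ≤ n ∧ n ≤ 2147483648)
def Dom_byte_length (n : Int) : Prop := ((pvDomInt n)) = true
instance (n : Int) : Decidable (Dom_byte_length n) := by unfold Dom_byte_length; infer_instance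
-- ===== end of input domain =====

-- ===== PORT A =====
-- B changes: closed-form ceiling division on the bit length instead of A's shift-count loop (objective: simpler).
-- Loop of A: while n: n >>= 8; bytes_count += 1.  Exact for n ≥ 0 (Pre_): there 'n >>= 8' is n // 256 on Nat.
-- (A never terminates on negative n, which Pre_ excludes.)
def byteLoopA : Nat → Int → Int
  | 0, acc => acc
  | m+1, acc => byteLoopA ((m+1)/256) (acc+1)
  decreasing_by omega

def byte_length (n : Int) : Int :=
  if n = 0 then 1 else byteLoopA n.toNat 0

-- ===== PORT B =====
def byte_length_alt (n : Int) : Int :=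
  if n = 0 then 1 else PySem.Int.floordiv ((PySem.Int.bitLength n : Int) + 7) 8

-- ===== PRECONDITION & SPEC =====
-- Pre_ excludes negative n: A's while-loop never terminates there (n >>= 8 floors toward -1).
def Pre_byte_length (n : Int) : Prop := 0 ≤ n
instance (n : Int) : Decidable (Pre_byte_length n) := by unfold Pre_byte_length; infer_instance
def pvWitness_byte_length : Int := (5)
def Spec_byte_length (n : Int) (out : Int) : Prop := out = byte_length_alt n
instance (n : Int) (out : Int) : Decidable (Spec_byte_length n out) := by unfold Spec_byte_length; infer_instance

-- ===== CLAIM (what is proved, stated in full; the proofs are below) =====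
def Claim_equal_byte_length : Prop := ∀ (n : Int), Dom_byte_length n → Pre_byte_length n → Spec_byte_length n (byte_length n)

-- ===== LEMMAS AND PROOFS =====

theorem blen_pos (m : Nat) (h : 0 < m) : 0 < PySem.Int.bitLength (m : Int) := by
  have h1 := PySem.Int.lt_two_pow_bitLength (m : Int)
  simp only [Int.natAbs_natCast] at h1
  by_contra hc
  have : PySem.Int.bitLength (m : Int) = 0 := by omega
  rw [this] at h1; simp at h1; omega

theorem blen_le (m k : Nat) (h : m < 2 ^ k) : PySem.Int.bitLength (m : Int) ≤ k := by
  by_cases hm : m = 0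
  · subst hm; simp [PySem.Int.bitLength_zero]
  · have h2 := PySem.Int.two_pow_bitLength_le (m : Int) (by exact_mod_cast hm)
    simp only [Int.natAbs_natCast] at h2
    by_contra hc
    have : 2 ^ k ≤ 2 ^ (PySem.Int.bitLength (m : Int) - 1) :=
      Nat.pow_le_pow_right (by norm_num) (by omega)
    omega

theorem blen_ge (m k : Nat) (h : 2 ^ k ≤ m) : k < PySem.Int.bitLength (m : Int) := by
  have h1 := PySem.Int.lt_two_pow_bitLength (m : Int)
  simp only [Int.natAbs_natCast] at h1
  by_contra hc
  have : 2 ^ (PySem.Int.bitLength (m : Int)) ≤ 2 ^ k :=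
    Nat.pow_le_pow_right (by norm_num) (by omega)
  omega

theorem blen_div_pow (k : Nat) : ∀ m : Nat, 2 ^ k ≤ m →
    PySem.Int.bitLength ((m / 2 ^ k : Nat) : Int) = PySem.Int.bitLength (m : Int) - k := by
  induction k with
  | zero => intro m _; simp
  | succ k ih =>
    intro m hm
    have hpow : 2 ^ (k+1) = 2 * 2 ^ k := by ring
    have hm0 : 0 < m := by have : 0 < 2 ^ (k+1) := Nat.pow_pos (by norm_num); omega
    have hdd : m / 2 ^ (k+1) = (m / 2) / 2 ^ k := by
      rw [Nat.div_div_eq_div_mul]; rw [hpow, Nat.mul_comm]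
    have hle : 2 ^ k ≤ m / 2 := by
      rw [Nat.le_div_iff_mul_le (by norm_num)]; omega
    have hstep := PySem.Int.bitLength_natCast hm0
    have := ih (m / 2) hle
    rw [hdd, this, hstep]
    have := blen_ge (m/2) k hle
    omega

theorem loopA_eq : ∀ m : Nat, 0 < m → ∀ acc : Int,
    byteLoopA m acc = acc + (((PySem.Int.bitLength (m : Int) + 7) / 8 : Nat) : Int) := by
  intro m
  induction m using Nat.strong_induction_on with
  | _ m ih =>
    intro hm acc
    obtain ⟨m', rfl⟩ : ∃ m', m = m' + 1 := ⟨m - 1, by omega⟩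
    rw [byteLoopA]
    by_cases hs : m' + 1 < 256
    · have h0 : (m' + 1) / 256 = 0 := Nat.div_eq_of_lt hs
      rw [h0, byteLoopA]
      have h1 := blen_pos (m'+1) (by omega)
      have h2 := blen_le (m'+1) 8 (by norm_num; omega)
      have : (PySem.Int.bitLength ((m'+1 : Nat) : Int) + 7) / 8 = 1 := by omega
      rw [this]; push_cast; ring
    · have hq : 0 < (m' + 1) / 256 := Nat.div_pos (by omega) (by norm_num)
      have hlt : (m' + 1) / 256 < m' + 1 := Nat.div_lt_self (by omega) (by norm_num)
      rw [ih _ hlt hq]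
      have hdp := blen_div_pow 8 (m'+1) (by norm_num; omega)
      rw [show (2:Nat)^8 = 256 from by norm_num] at hdp
      rw [hdp]
      have h9 := blen_ge (m'+1) 8 (by norm_num; omega)
      set b := PySem.Int.bitLength ((m'+1 : Nat) : Int) with hb
      have : (b + 7) / 8 = (b - 8 + 7) / 8 + 1 := by omega
      rw [this]; push_cast; ring

-- ===== VERDICT (by name: the statement is the Claim_ definition above) =====
theorem byte_length_spec : Claim_equal_byte_length := by
  intro n _ hpre
  unfold Spec_byte_length byte_length byte_length_alt
  by_cases h0 : n = 0
  · simp [h0]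
  · simp only [h0, if_false]
    have hn : 0 < n := lt_of_le_of_ne hpre (Ne.symm h0)
    have hmn : ((n.toNat : Nat) : Int) = n := Int.toNat_of_nonneg hpre
    have hmp : 0 < n.toNat := by omega
    rw [loopA_eq n.toNat hmp 0]
    rw [← hmn]
    rw [show ((PySem.Int.bitLength ((n.toNat : Nat) : Int) : Nat) : Int) + 7
          = (((PySem.Int.bitLength ((n.toNat : Nat) : Int) + 7 : Nat)) : Int) from by push_cast; ring]
    rw [show (8:Int) = ((8:Nat):Int) from rfl, PySem.Int.floordiv_natCast]
    simp
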